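-- pv_equiv track=rewrite | github.com/zdodds/contributed-submissions | submissions_cs35_sp2025/submission_355/final|hw3pr1 .py | handle_unordered_lists
-- ===== SOURCE A (Python) =====
-- def handle_unordered_lists(markdown_text):
--     # Split the text into lines
--     lines = markdown_text.split('\n')
--
--     html_lines = []
--     in_list = False
--
--     for line in lines:
--         if line.startswith('+ '):
--             if not in_list:
--                 html_lines.append('<ul>')
--                 in_list = True
--             item = line[2:]
--             html_lines.append(f'<li>{item}</li>')
--         else:
--             if in_list:
--                 html_lines.append('</ul>')
--                 in_list = False
--             html_lines.append(line)
--
--     if in_list: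
--         html_lines.append('</ul>')
--
--     return '\n'.join(html_lines)
-- ===== SOURCE B (Python) =====
-- def handle_unordered_lists(markdown_text):
--     # Block-wise: find each maximal run of '+ ' lines and wrap it as one <ul> block.
--     lines = markdown_text.split('\n')
--     pieces = []
--     i = 0
--     n = len(lines)
--     while i < n:
--         if lines[i].startswith('+ '):
--             j = i
--             while j < n and lines[j].startswith('+ '):
--                 j += 1
--             pieces.append('<ul>')
--             pieces.extend('<li>' + line[2:] + '</li>' for line in lines[i:j])
--             pieces.append('</ul>')
--             i = j
--         else:
--             pieces.append(lines[i])
--             i += 1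
--     return '\n'.join(pieces)
-- ===== Notes on version B (the rewrite author's own statement) =====
-- stated objective: alternative
-- what changed: Replaces A's single-pass in_list flag state machine with block-wise processing: each maximal run of list-item lines is located (an inner scan advancing j, takeWhile/dropWhile in the port) and emitted as one ul block, non-list lines pass through individually.
import Mathlib
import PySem

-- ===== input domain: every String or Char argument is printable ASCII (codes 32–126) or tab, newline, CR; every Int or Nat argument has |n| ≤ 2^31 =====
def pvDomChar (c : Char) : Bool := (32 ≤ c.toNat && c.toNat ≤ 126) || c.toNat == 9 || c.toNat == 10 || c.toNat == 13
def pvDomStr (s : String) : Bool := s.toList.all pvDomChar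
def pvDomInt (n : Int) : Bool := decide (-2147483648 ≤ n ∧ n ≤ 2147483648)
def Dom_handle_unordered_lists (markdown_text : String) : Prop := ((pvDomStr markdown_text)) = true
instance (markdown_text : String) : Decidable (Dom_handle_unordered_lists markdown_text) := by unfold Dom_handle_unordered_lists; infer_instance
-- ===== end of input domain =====

-- B replaces A's in_list state machine with block-wise processing of maximal runs of '+ ' lines (alternative decomposition, same cost).

-- ===== PORT A =====
-- A: split on '\n', then a single pass maintaining (html_lines, in_list); close the <ul> at the end if still open.
def handle_unordered_lists (markdown_text : String) : String :=
  let lines := PySem.Chars.splitOn markdown_text.toList ['\n']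
  let st := lines.foldl
    (fun (st : List (List Char) × Bool) line =>
      if PySem.Chars.startswith line ['+', ' '] then
        let acc := if st.2 then st.1 else st.1 ++ [['<', 'u', 'l', '>']]
        (acc ++ [['<', 'l', 'i', '>'] ++ PySem.Chars.slice line (some 2) none ++ ['<', '/', 'l', 'i', '>']], true)
      else
        let acc := if st.2 then st.1 ++ [['<', '/', 'u', 'l', '>']] else st.1
        (acc ++ [line], false))
    ([], false)
  let html_lines := if st.2 then st.1 ++ [['<', '/', 'u', 'l', '>']] else st.1
  String.ofList (PySem.Chars.join ['\n'] html_lines)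

-- ===== PORT B =====
-- B: recursion over the lines; a '+ ' line starts a maximal run (takeWhile/dropWhile = Source B's inner while loop
-- advancing j), emitted as one <ul>…</ul> block; other lines are passed through one at a time.
def handle_unordered_lists_alt_go : List (List Char) → List (List Char)
  | [] => []
  | l :: ls =>
    if PySem.Chars.startswith l ['+', ' '] then
      let run := (l :: ls).takeWhile (fun x => PySem.Chars.startswith x ['+', ' '])
      let rest := (l :: ls).dropWhile (fun x => PySem.Chars.startswith x ['+', ' '])
      (['<', 'u', 'l', '>'] ::
        run.map (fun x => ['<', 'l', 'i', '>'] ++ PySem.Chars.slice x (some 2) none ++ ['<', '/', 'l', 'i', '>']))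
        ++ (['<', '/', 'u', 'l', '>'] :: handle_unordered_lists_alt_go rest)
    else l :: handle_unordered_lists_alt_go ls
termination_by ls => ls.length
decreasing_by
  · simp only [List.dropWhile]
    split
    · exact Nat.lt_succ_of_le (List.length_dropWhile_le _ _)
    · simp_all
  · simp

def handle_unordered_lists_alt (markdown_text : String) : String :=
  let lines := PySem.Chars.splitOn markdown_text.toList ['\n']
  String.ofList (PySem.Chars.join ['\n'] (handle_unordered_lists_alt_go lines))

-- ===== PRECONDITION & SPEC =====
def Spec_handle_unordered_lists (markdown_text : String) (out : String) : Prop := out = handle_unordered_lists_alt markdown_text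
instance (markdown_text : String) (out : String) : Decidable (Spec_handle_unordered_lists markdown_text out) := by unfold Spec_handle_unordered_lists; infer_instance

-- ===== CLAIM (what is proved, stated in full; the proofs are below) =====
def Claim_equal_handle_unordered_lists : Prop := ∀ (markdown_text : String), Dom_handle_unordered_lists markdown_text → Spec_handle_unordered_lists markdown_text (handle_unordered_lists markdown_text)

-- ===== LEMMAS AND PROOFS =====

-- abbreviations used only by the proofs
def pvStep (st : List (List Char) × Bool) (line : List Char) : List (List Char) × Bool :=
  if PySem.Chars.startswith line ['+', ' '] then
    let acc := if st.2 then st.1 else st.1 ++ [['<', 'u', 'l', '>']]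
    (acc ++ [['<', 'l', 'i', '>'] ++ PySem.Chars.slice line (some 2) none ++ ['<', '/', 'l', 'i', '>']], true)
  else
    let acc := if st.2 then st.1 ++ [['<', '/', 'u', 'l', '>']] else st.1
    (acc ++ [line], false)

def pvClose (st : List (List Char) × Bool) : List (List Char) :=
  if st.2 then st.1 ++ [['<', '/', 'u', 'l', '>']] else st.1

def pvLi (x : List Char) : List Char :=
  ['<', 'l', 'i', '>'] ++ PySem.Chars.slice x (some 2) none ++ ['<', '/', 'l', 'i', '>']

-- the loop invariant: running A's fold from (acc, b) and closing equals acc followed by B's block output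
-- (for b = true: the pending run's <li>s, the closing </ul>, then B restarted on the rest).
theorem pvLoop (lines : List (List Char)) :
    ∀ (acc : List (List Char)) (b : Bool),
      pvClose (lines.foldl pvStep (acc, b)) =
        acc ++ (if b then
            ((lines.takeWhile (fun x => PySem.Chars.startswith x ['+', ' '])).map pvLi)
              ++ (['<', '/', 'u', 'l', '>'] ::
                  handle_unordered_lists_alt_go
                    (lines.dropWhile (fun x => PySem.Chars.startswith x ['+', ' '])))
          else handle_unordered_lists_alt_go lines) := by
  induction lines with
  | nil =>
    intro acc b
    cases b <;> simp [pvClose, handle_unordered_lists_alt_go]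
  | cons l ls ih =>
    intro acc b
    by_cases hl : PySem.Chars.startswith l ['+', ' '] = true
    · cases b with
      | false =>
        rw [List.foldl_cons]
        have hstep : pvStep (acc, false) l
            = (acc ++ [['<', 'u', 'l', '>']] ++ [pvLi l], true) := by
          simp [pvStep, pvLi, hl]
        rw [hstep, ih, handle_unordered_lists_alt_go]
        simp [pvLi, hl]
      | true =>
        rw [List.foldl_cons]
        have hstep : pvStep (acc, true) l = (acc ++ [pvLi l], true) := by
          simp [pvStep, pvLi, hl]
        rw [hstep, ih]
        simp [pvLi, hl]
    · cases b with
      | false =>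
        rw [List.foldl_cons]
        have hstep : pvStep (acc, false) l = (acc ++ [l], false) := by
          simp [pvStep, hl]
        rw [hstep, ih, handle_unordered_lists_alt_go]
        simp [hl]
      | true =>
        rw [List.foldl_cons]
        have hstep : pvStep (acc, true) l
            = (acc ++ [['<', '/', 'u', 'l', '>']] ++ [l], false) := by
          simp [pvStep, hl]
        rw [hstep, ih]
        simp only [Bool.false_eq_true, if_false, List.takeWhile_cons, List.dropWhile_cons, hl,
          List.map_nil, List.nil_append]
        conv_rhs => rw [handle_unordered_lists_alt_go]
        simp [hl]

-- ===== VERDICT (by name: the statement is the Claim_ definition above) =====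
theorem handle_unordered_lists_spec : Claim_equal_handle_unordered_lists := by
  intro s _
  unfold Spec_handle_unordered_lists
  have e1 : handle_unordered_lists s
      = String.ofList (PySem.Chars.join ['\n']
          (pvClose ((PySem.Chars.splitOn s.toList ['\n']).foldl pvStep ([], false)))) := rfl
  have e2 : handle_unordered_lists_alt s
      = String.ofList (PySem.Chars.join ['\n']
          (handle_unordered_lists_alt_go (PySem.Chars.splitOn s.toList ['\n']))) := rfl
  rw [e1, e2, pvLoop]
  simp
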